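-- pv_equiv track=rewrite | github.com/freyavs/computational-biology-1 | set_search.py | get_all_substring_combinations
-- ===== SOURCE A (Python) =====
-- from itertools import combinations
--
-- def get_all_substring_combinations(s, l, words, max_len):
--     res = set()
--     for word in l:
--         # get all substrings that are not length 1
--         substrings = (word[x:y] for x, y in combinations(
--             range(len(word) + 1), r = 2) if 1 < abs(x-y) < max_len)
--         for w in substrings:
--             if w in words: res.add(w)
--             if w[::-1] in words: res.add(w[::-1])
--
--     # voeg letters appart toe
--     res.update(set(s).intersection(words))
--     return res
-- ===== SOURCE B (Python) =====
-- def get_all_substring_combinations(s, l, words, max_len):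
--     # candidate-driven: test each distinct target word directly for containment
--     res = set()
--     for t in set(words):
--         if 2 <= len(t) < max_len and any(t in word or t[::-1] in word for word in l):
--             res.add(t)
--     for c in set(s):
--         if c in words:
--             res.add(c)
--     return res
-- ===== Notes on version B (the rewrite author's own statement) =====
-- stated objective: alternative
-- what changed: Inverts the traversal: instead of enumerating every length-2..max_len-1 substring of each word in l and testing membership in words, B loops over the DISTINCT candidate targets in words and admits t when 2 <= len(t) < max_len and t or t[::-1] occurs as a substring of some word in l; distinct single characters of s are added by a direct scan.
import Mathlib
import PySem

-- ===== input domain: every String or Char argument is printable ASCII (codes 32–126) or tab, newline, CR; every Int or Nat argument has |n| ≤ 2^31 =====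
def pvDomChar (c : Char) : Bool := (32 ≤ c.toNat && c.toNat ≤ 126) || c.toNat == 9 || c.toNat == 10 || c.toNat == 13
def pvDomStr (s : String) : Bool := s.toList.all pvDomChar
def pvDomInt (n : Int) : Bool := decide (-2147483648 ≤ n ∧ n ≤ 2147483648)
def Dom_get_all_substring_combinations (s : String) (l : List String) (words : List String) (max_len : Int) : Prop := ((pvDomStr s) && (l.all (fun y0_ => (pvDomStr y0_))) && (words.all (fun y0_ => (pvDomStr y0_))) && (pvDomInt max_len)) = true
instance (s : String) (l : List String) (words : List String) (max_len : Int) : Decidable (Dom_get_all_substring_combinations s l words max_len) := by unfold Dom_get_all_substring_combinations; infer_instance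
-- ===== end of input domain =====

-- B inverts the traversal (candidate-driven: test each target word of admissible length for
-- containment in some element of l, plus its reverse) instead of A's enumeration of all
-- substrings of every element of l.  The Python function returns a SET (no order): both ports
-- return its elements as the ascending sorted list, the canonical representation of that set.

-- ===== PORT A =====
-- Strings are handled on the List Char side (PySem convention); w[::-1] is List.reverse
-- (PySem.List.slice?_none_none_neg_one); the generator's filter is evaluated lazily inside its
-- loop (pvStepA is that loop body, named so the proofs can unfold it arm by arm).
def pvStepA (ws : List (List Char)) (max_len : Int) (cs : List Char)
    (res : PySem.Set (List Char)) (c : List Int) : PySem.Set (List Char) :=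
  match c with
  | [x, y] =>
    if 1 < |x - y| ∧ |x - y| < max_len then
      let w := PySem.List.slice cs (some x) (some y)
      let res1 := if ws.contains w then PySem.Set.add res w else res
      if ws.contains w.reverse then PySem.Set.add res1 w.reverse else res1
    else res
  | _ => res

def get_all_substring_combinations (s : String) (l : List String) (words : List String) (max_len : Int) : List String :=
  let ws : List (List Char) := words.map String.toList
  let res : PySem.Set (List Char) :=
    l.foldl (fun res word =>
      (PySem.List.combinations (PySem.List.pyRange 0 ((word.toList.length : Int) + 1) 1) 2).foldl
        (pvStepA ws max_len word.toList) res) PySem.Set.empty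
  PySem.List.sorted ((PySem.Set.update res (PySem.Set.inter (PySem.Set.ofList (s.toList.map (fun ch => [ch]))) ws)).map String.ofList) (fun x => x) false

-- ===== PORT B =====
def get_all_substring_combinations_alt (s : String) (l : List String) (words : List String) (max_len : Int) : List String :=
  let res : PySem.Set (List Char) :=
    (PySem.Set.ofList (words.map String.toList)).foldl (fun res t =>
      if 2 ≤ (t.length : Int) ∧ (t.length : Int) < max_len ∧
          l.any (fun word => PySem.Chars.isIn t word.toList
                          || PySem.Chars.isIn t.reverse word.toList)
      then PySem.Set.add res t else res) PySem.Set.empty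
  let res2 : PySem.Set (List Char) :=
    (PySem.Set.ofList s.toList).foldl (fun res c =>
      if (words.map String.toList).contains [c] then PySem.Set.add res [c] else res) res
  PySem.List.sorted (res2.map String.ofList) (fun x => x) false

-- ===== PRECONDITION & SPEC =====
def Spec_get_all_substring_combinations (s : String) (l : List String) (words : List String) (max_len : Int) (out : List String) : Prop := out = get_all_substring_combinations_alt s l words max_len
instance (s : String) (l : List String) (words : List String) (max_len : Int) (out : List String) : Decidable (Spec_get_all_substring_combinations s l words max_len out) := by unfold Spec_get_all_substring_combinations; infer_instance

-- ===== CLAIM =====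
def Claim_equal_get_all_substring_combinations : Prop := ∀ (s : String) (l : List String) (words : List String) (max_len : Int), Dom_get_all_substring_combinations s l words max_len → Spec_get_all_substring_combinations s l words max_len (get_all_substring_combinations s l words max_len)

-- ===== LEMMAS AND PROOFS =====

-- generic membership of a fold that only ever ADDS elements (step described by P)
theorem pvMemFoldl {α β : Type} (f : PySem.Set β → α → PySem.Set β) (P : α → β → Prop)
    (hf : ∀ s x y, y ∈ f s x ↔ y ∈ s ∨ P x y) (l : List α) (s : PySem.Set β) (y : β) :
    y ∈ l.foldl f s ↔ y ∈ s ∨ ∃ x ∈ l, P x y := by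
  induction l generalizing s with
  | nil => simp
  | cons a t ih =>
    rw [List.foldl_cons, ih, hf]
    simp only [List.mem_cons]
    constructor
    · rintro ((h | h) | ⟨x, hx, hP⟩)
      · exact Or.inl h
      · exact Or.inr ⟨a, Or.inl rfl, h⟩
      · exact Or.inr ⟨x, Or.inr hx, hP⟩
    · rintro (h | ⟨x, (rfl | hx), hP⟩)
      · exact Or.inl (Or.inl h)
      · exact Or.inl (Or.inr hP)
      · exact Or.inr ⟨x, hx, hP⟩

-- generic nodup preservation of such a fold
theorem pvNodupFoldl {α β : Type} (f : PySem.Set β → α → PySem.Set β)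
    (hf : ∀ s x, s.Nodup → (f s x).Nodup) (l : List α) (s : PySem.Set β) (h : s.Nodup) :
    (l.foldl f s).Nodup := by
  induction l generalizing s with
  | nil => exact h
  | cons a t ih => exact ih _ (hf _ _ h)

-- [x, y] is a sublist of an increasing unit range iff both are in range and ordered
theorem pvPairSublist (a b x y : Int) :
    [x, y].Sublist (PySem.List.pyRange a b 1) ↔ a ≤ x ∧ x < y ∧ y < b := by
  constructor
  · intro h
    have hx : x ∈ PySem.List.pyRange a b 1 := h.subset (by simp)
    have hy : y ∈ PySem.List.pyRange a b 1 := h.subset (by simp)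
    rw [PySem.List.mem_pyRange_one] at hx hy
    have hp := (PySem.List.pairwise_lt_pyRange_one a b).sublist h
    simp [List.pairwise_cons] at hp
    exact ⟨hx.1, hp, hy.2⟩
  · rintro ⟨h1, h2, h3⟩
    have hsplit : PySem.List.pyRange a b 1
        = PySem.List.pyRange a (x+1) 1 ++ PySem.List.pyRange (x+1) b 1 :=
      PySem.List.pyRange_one_append a (x+1) b (by omega) (by omega)
    rw [hsplit]
    have hx : [x].Sublist (PySem.List.pyRange a (x+1) 1) := by
      rw [List.singleton_sublist, PySem.List.mem_pyRange_one]; omega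
    have hy : [y].Sublist (PySem.List.pyRange (x+1) b 1) := by
      rw [List.singleton_sublist, PySem.List.mem_pyRange_one]; omega
    exact List.Sublist.append hx hy

-- the admissible slices of cs are exactly its infixes of length 2..ml-1
theorem pvSliceIff (cs t : List Char) (ml : Int) :
    (∃ x y : Int, [x, y].Sublist (PySem.List.pyRange 0 ((cs.length : Int) + 1) 1)
        ∧ (1 < |x - y| ∧ |x - y| < ml)
        ∧ PySem.List.slice cs (some x) (some y) = t)
      ↔ (t <:+: cs ∧ 1 < t.length ∧ (t.length : Int) < ml) := by
  constructor
  · rintro ⟨x, y, hsub, ⟨hg1, hg2⟩, hslice⟩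
    rw [pvPairSublist] at hsub
    obtain ⟨h0, hxy, hyb⟩ := hsub
    have habs : |x - y| = y - x := by rw [abs_sub_comm]; exact abs_of_nonneg (by omega)
    rw [habs] at hg1 hg2
    obtain ⟨p, hp⟩ : ∃ p : Nat, x = (p : Int) := ⟨x.toNat, by omega⟩
    obtain ⟨q, hq⟩ : ∃ q : Nat, y = (p : Int) + (q : Int) := ⟨(y - x).toNat, by omega⟩
    subst hp hq
    rw [PySem.List.slice_natCast_add] at hslice
    subst hslice
    have hlen : ((cs.drop p).take q).length = q := by
      simp [List.length_take, List.length_drop]; omega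
    refine ⟨(List.take_prefix q (cs.drop p)).isInfix.trans (List.drop_suffix p cs).isInfix, ?_, ?_⟩ <;>
      rw [hlen] <;> omega
  · rintro ⟨⟨pre, suf, hcs⟩, h1, h2⟩
    refine ⟨(pre.length : Int), (pre.length : Int) + (t.length : Int), ?_, ⟨?_, ?_⟩, ?_⟩
    · rw [pvPairSublist]
      have : cs.length = pre.length + t.length + suf.length := by
        rw [← hcs]; simp; omega
      omega
    · have : |(pre.length : Int) - ((pre.length : Int) + (t.length : Int))| = (t.length : Int) := by
        rw [abs_sub_comm]; simp
      omega
    · have : |(pre.length : Int) - ((pre.length : Int) + (t.length : Int))| = (t.length : Int) := by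
        rw [abs_sub_comm]; simp
      omega
    · rw [PySem.List.slice_natCast_add, ← hcs]
      rw [List.append_assoc, List.drop_left, List.take_left]

-- membership through one step of A's inner loop
theorem pvMemStepA (ws : List (List Char)) (ml : Int) (cs : List Char)
    (s : PySem.Set (List Char)) (c : List Int) (y : List Char) :
    y ∈ pvStepA ws ml cs s c ↔ y ∈ s ∨ ∃ x x' : Int, c = [x, x']
      ∧ (1 < |x - x'| ∧ |x - x'| < ml)
      ∧ ((PySem.List.slice cs (some x) (some x') ∈ ws ∧ y = PySem.List.slice cs (some x) (some x'))
        ∨ ((PySem.List.slice cs (some x) (some x')).reverse ∈ ws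
            ∧ y = (PySem.List.slice cs (some x) (some x')).reverse)) := by
  rcases c with _ | ⟨x1, _ | ⟨x2, _ | ⟨x3, rest⟩⟩⟩ <;> simp only [pvStepA] <;>
    try exact ⟨fun h => Or.inl h,
      by rintro (h | ⟨x, x', hxy, -⟩) <;> first | exact h | simp at hxy⟩
  constructor
  · intro h
    split_ifs at h with hg hrev hw hw
    · rw [PySem.Set.mem_add] at h
      rcases h with h | rfl
      · rw [PySem.Set.mem_add] at h
        rcases h with h | rfl
        · exact Or.inl h
        · exact Or.inr ⟨x1, x2, rfl, hg, Or.inl ⟨by simpa using hw, rfl⟩⟩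
      · exact Or.inr ⟨x1, x2, rfl, hg, Or.inr ⟨by simpa using hrev, rfl⟩⟩
    · rw [PySem.Set.mem_add] at h
      rcases h with h | rfl
      · exact Or.inl h
      · exact Or.inr ⟨x1, x2, rfl, hg, Or.inr ⟨by simpa using hrev, rfl⟩⟩
    · rw [PySem.Set.mem_add] at h
      rcases h with h | rfl
      · exact Or.inl h
      · exact Or.inr ⟨x1, x2, rfl, hg, Or.inl ⟨by simpa using hw, rfl⟩⟩
    · exact Or.inl h
    · exact Or.inl h
  · rintro (h | ⟨x, x', hxy, hg, hcase⟩)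
    · split_ifs <;> simp [PySem.Set.mem_add, h]
    · obtain ⟨rfl, rfl⟩ : x1 = x ∧ x2 = x' := by simpa using hxy
      rw [if_pos hg]
      rcases hcase with ⟨hm, rfl⟩ | ⟨hm, rfl⟩ <;>
        split_ifs <;> simp_all [PySem.Set.mem_add]

-- membership in A's per-word inner fold
theorem pvMemInnerA (ws : List (List Char)) (ml : Int) (cs : List Char)
    (res : PySem.Set (List Char)) (t : List Char) :
    t ∈ (PySem.List.combinations (PySem.List.pyRange 0 ((cs.length : Int) + 1) 1) 2).foldl
        (pvStepA ws ml cs) res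
      ↔ t ∈ res ∨ (t ∈ ws ∧ 1 < t.length ∧ (t.length : Int) < ml
            ∧ (t <:+: cs ∨ t.reverse <:+: cs)) := by
  rw [pvMemFoldl _ (fun c t => ∃ x y : Int, c = [x, y] ∧ (1 < |x - y| ∧ |x - y| < ml)
      ∧ ((PySem.List.slice cs (some x) (some y) ∈ ws ∧ t = PySem.List.slice cs (some x) (some y))
        ∨ ((PySem.List.slice cs (some x) (some y)).reverse ∈ ws
            ∧ t = (PySem.List.slice cs (some x) (some y)).reverse)))]
  · constructor
    · rintro (h | ⟨c, hc, x, y, rfl, hg, hcase⟩)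
      · exact Or.inl h
      · rw [PySem.List.mem_combinations_iff] at hc
        have hpair : ∃ x' y' : Int, [x', y'].Sublist (PySem.List.pyRange 0 ((cs.length : Int) + 1) 1)
            ∧ (1 < |x' - y'| ∧ |x' - y'| < ml)
            ∧ PySem.List.slice cs (some x') (some y') = PySem.List.slice cs (some x) (some y) :=
          ⟨x, y, hc.1, hg, rfl⟩
        rw [pvSliceIff] at hpair
        obtain ⟨hinf, hl1, hl2⟩ := hpair
        rcases hcase with ⟨hmem, rfl⟩ | ⟨hmem, rfl⟩
        · exact Or.inr ⟨hmem, hl1, hl2, Or.inl hinf⟩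
        · exact Or.inr ⟨hmem, by simpa using hl1, by simpa using hl2, Or.inr (by simpa using hinf)⟩
    · rintro (h | ⟨hmem, hl1, hl2, hinf | hinf⟩)
      · exact Or.inl h
      · obtain ⟨x, y, hsub, hg, hslice⟩ := (pvSliceIff cs t ml).2 ⟨hinf, hl1, hl2⟩
        exact Or.inr ⟨[x, y], (PySem.List.mem_combinations_iff _ _ _).2 ⟨hsub, rfl⟩,
          x, y, rfl, hg, Or.inl ⟨hslice ▸ hmem, hslice.symm⟩⟩
      · obtain ⟨x, y, hsub, hg, hslice⟩ := (pvSliceIff cs t.reverse ml).2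
          ⟨hinf, by simpa using hl1, by simpa using hl2⟩
        exact Or.inr ⟨[x, y], (PySem.List.mem_combinations_iff _ _ _).2 ⟨hsub, rfl⟩,
          x, y, rfl, hg, Or.inr ⟨by rw [hslice]; simpa using hmem, by rw [hslice]; simp⟩⟩
  · exact fun s c y => pvMemStepA ws ml cs s c y

-- membership in A's whole substring phase
theorem pvMemPhaseA (ws : List (List Char)) (ml : Int) (l : List String) (t : List Char) :
    t ∈ l.foldl (fun res word =>
      (PySem.List.combinations (PySem.List.pyRange 0 ((word.toList.length : Int) + 1) 1) 2).foldl
        (pvStepA ws ml word.toList) res) PySem.Set.empty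
      ↔ (t ∈ ws ∧ 1 < t.length ∧ (t.length : Int) < ml
          ∧ ∃ word ∈ l, (t <:+: word.toList ∨ t.reverse <:+: word.toList)) := by
  rw [pvMemFoldl _ (fun word t => t ∈ ws ∧ 1 < t.length ∧ (t.length : Int) < ml
      ∧ (t <:+: word.toList ∨ t.reverse <:+: word.toList))
      (fun s word y => pvMemInnerA ws ml word.toList s y)]
  simp only [PySem.Set.empty, List.not_mem_nil, false_or]
  constructor
  · rintro ⟨w, hw, hm, h1, h2, hi⟩; exact ⟨hm, h1, h2, w, hw, hi⟩
  · rintro ⟨hm, h1, h2, w, hw, hi⟩; exact ⟨w, hw, hm, h1, h2, hi⟩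

-- membership in B's candidate phase
theorem pvMemPhaseB (l words : List String) (ml : Int) (t : List Char) :
    t ∈ (PySem.Set.ofList (words.map String.toList)).foldl (fun res t' =>
      if 2 ≤ (t'.length : Int) ∧ (t'.length : Int) < ml ∧
          l.any (fun word => PySem.Chars.isIn t' word.toList
                          || PySem.Chars.isIn t'.reverse word.toList)
      then PySem.Set.add res t' else res) PySem.Set.empty
      ↔ (t ∈ words.map String.toList ∧ 1 < t.length ∧ (t.length : Int) < ml
          ∧ ∃ word ∈ l, (t <:+: word.toList ∨ t.reverse <:+: word.toList)) := by
  rw [pvMemFoldl _ (fun t' t => (2 ≤ (t'.length : Int) ∧ (t'.length : Int) < ml ∧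
      l.any (fun word => PySem.Chars.isIn t' word.toList
                      || PySem.Chars.isIn t'.reverse word.toList) = true) ∧ t = t')]
  · simp only [PySem.Set.empty, List.not_mem_nil, false_or]
    constructor
    · rintro ⟨w, hw, ⟨hg1, hg2, hany⟩, rfl⟩
      rw [List.any_eq_true] at hany
      obtain ⟨word, hword, hb⟩ := hany
      rw [Bool.or_eq_true, PySem.Chars.isIn_iff_infix, PySem.Chars.isIn_iff_infix] at hb
      exact ⟨(PySem.Set.mem_ofList _ _).1 hw, by omega, by omega, word, hword, hb⟩
    · rintro ⟨hw, h1, h2, word, hword, hi⟩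
      refine ⟨t, (PySem.Set.mem_ofList _ _).2 hw, ⟨by omega, by omega, ?_⟩, rfl⟩
      rw [List.any_eq_true]
      exact ⟨word, hword, by rw [Bool.or_eq_true, PySem.Chars.isIn_iff_infix,
        PySem.Chars.isIn_iff_infix]; exact hi⟩
  · intro s x y
    split_ifs with hg
    · rw [PySem.Set.mem_add]; tauto
    · constructor
      · exact Or.inl
      · rintro (h | ⟨hg', rfl⟩)
        · exact h
        · exact absurd hg' hg

-- membership in B's single-character phase
theorem pvMemSinglesB (ws : List (List Char)) (sl : List Char)
    (res : PySem.Set (List Char)) (t : List Char) :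
    t ∈ (PySem.Set.ofList sl).foldl (fun res c => if ws.contains [c] then PySem.Set.add res [c] else res) res
      ↔ t ∈ res ∨ (∃ c ∈ sl, t = [c]) ∧ t ∈ ws := by
  rw [pvMemFoldl _ (fun c t => t = [c] ∧ [c] ∈ ws)]
  · constructor
    · rintro (h | ⟨c, hc, rfl, hm⟩)
      · exact Or.inl h
      · exact Or.inr ⟨⟨c, (PySem.Set.mem_ofList _ _).1 hc, rfl⟩, hm⟩
    · rintro (h | ⟨⟨c, hc, rfl⟩, hm⟩)
      · exact Or.inl h
      · exact Or.inr ⟨c, (PySem.Set.mem_ofList _ _).2 hc, rfl, hm⟩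
  · intro s c y
    split_ifs with hg
    · rw [PySem.Set.mem_add]
      simp only [List.contains_eq_mem, decide_eq_true_eq] at hg
      tauto
    · simp only [List.contains_eq_mem, decide_eq_true_eq] at hg
      constructor
      · exact Or.inl
      · rintro (h | ⟨rfl, hm⟩)
        · exact h
        · exact absurd hm hg

-- nodup of the two result sets
theorem pvNodupA (ws : List (List Char)) (ml : Int) (l : List String) :
    (l.foldl (fun res word =>
      (PySem.List.combinations (PySem.List.pyRange 0 ((word.toList.length : Int) + 1) 1) 2).foldl
        (pvStepA ws ml word.toList) res) PySem.Set.empty).Nodup := by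
  refine pvNodupFoldl _ ?_ _ _ List.nodup_nil
  intro s word hs
  refine pvNodupFoldl _ ?_ _ _ hs
  intro s' c hs'
  rcases c with _ | ⟨x1, _ | ⟨x2, _ | ⟨x3, rest⟩⟩⟩ <;> simp only [pvStepA] <;>
    try exact hs'
  split_ifs <;> first
    | exact hs'
    | exact PySem.Set.nodup_add _ _ hs'
    | exact PySem.Set.nodup_add _ _ (PySem.Set.nodup_add _ _ hs')

theorem pvNodupGuardAdd {α : Type} [DecidableEq α] (g : α → Prop) [DecidablePred g]
    (key : α → List Char) (l : List α) (s : PySem.Set (List Char)) (h : s.Nodup) :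
    (l.foldl (fun res x => if g x then PySem.Set.add res (key x) else res) s).Nodup := by
  refine pvNodupFoldl _ ?_ _ _ h
  intro s' x hs'
  split_ifs
  · exact PySem.Set.nodup_add _ _ hs'
  · exact hs'

-- ===== VERDICT =====
theorem get_all_substring_combinations_spec : Claim_equal_get_all_substring_combinations := by
  intro s l words max_len _
  unfold Spec_get_all_substring_combinations get_all_substring_combinations get_all_substring_combinations_alt
  apply PySem.List.sorted_eq_sorted_of_perm _ _ _ (fun a b h => h)
  apply List.Perm.map
  apply (List.perm_ext_iff_of_nodup ?_ ?_).2
  · -- same members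
    intro t
    rw [PySem.Set.mem_update, PySem.Set.mem_inter, PySem.Set.mem_ofList, pvMemPhaseA,
      pvMemSinglesB, pvMemPhaseB]
    simp only [List.mem_map]
    constructor
    · rintro (h | ⟨⟨c, hc, rfl⟩, hm⟩)
      · exact Or.inl h
      · exact Or.inr ⟨⟨c, hc, rfl⟩, hm⟩
    · rintro (h | ⟨⟨c, hc, rfl⟩, hm⟩)
      · exact Or.inl h
      · exact Or.inr ⟨⟨c, hc, rfl⟩, hm⟩
  · exact PySem.Set.nodup_update _ _ (pvNodupA _ _ _)
  · exact pvNodupGuardAdd _ _ _ _ (pvNodupGuardAdd _ _ _ _ List.nodup_nil)
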